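-- pv_equiv track=rewrite | github.com/sam-flahive/dyl-encryption | dyl_0.1.py | wheel_II_turn
-- ===== SOURCE A (Python) =====
-- all_chars = ['a', 'b', 'c', 'd', 'e', 'f', 'g', 'h', 'i', 'j', 'k', 'l', 'm', 'n', 'o', 'p', 'q', 'r', 's', 't', 'u', 'v', 'w', 'x', 'y', 'z', 'A', 'B', 'C', 'D', 'E', 'F', 'G', 'H', 'I', 'J', 'K', 'L', 'M', 'N', 'O', 'P', 'Q', 'R', 'S', 'T', 'U', 'V', 'W', 'X', 'Y', 'Z', '0', '1', '2', '3', '4', '5', '6', '7', '8', '9', '|', ',', '<', '.', '>', '/', '?', '#', '~', '@', "'", ';', ':', '=', '+', '-', '_', ')', '(', '*', '&', '^', '%', '$', '£', '"', '!', '[', ']', '{', '}', ' ']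
--
-- def wheel(letter, value):
--          chars = {}
--          for char in all_chars:
--                   if value % 94 == 0:
--                            chars[char] = 94
--                   else:
--                            chars[char] = value % 94
--                   value += 1
--          return(chars[letter])
--
-- def wheel_II_turn(message, value):
--          group = []
--          counter = 0
--          for character in message:
--                   x = wheel(character, value)
--                   group.append(x)
--                   counter += 1
--                   if counter % 3 == 0:
--                            value += 1
--          return(group)
-- ===== SOURCE B (Python) =====
-- _PUNCT = ['|', ',', '<', '.', '>', '/', '?', '#', '~', '@', "'", ';', ':', '=', '+', '-', '_', ')', '(', '*', '&', '^', '%', '$', '\u00a3', '"', '!', '[', ']', '{', '}', ' ']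
--
-- def _wheel_index(c):
--     # position of c on the wheel, computed arithmetically from its code point
--     o = ord(c)
--     if 97 <= o <= 122:      # a-z -> 0..25
--         return o - 97
--     if 65 <= o <= 90:       # A-Z -> 26..51
--         return o - 39
--     if 48 <= o <= 57:       # 0-9 -> 52..61
--         return o + 4
--     return 62 + _PUNCT.index(c)
--
-- def wheel_II_turn(message, value):
--     return [(value + n // 3 + _wheel_index(ch) - 1) % 94 + 1
--             for n, ch in enumerate(message)]
-- ===== Notes on version B (the rewrite author's own statement) =====
-- stated objective: faster
-- what changed: B computes each character's wheel position arithmetically from its code point (a-z/A-Z/0-9 ranges, plus a small punctuation lookup) and emits each output in one comprehension as (value + n//3 + idx(ch) - 1) % 94 + 1, removing A's per-character rebuild of a 94-entry wheel dict and its running counter/value accumulators (the group-of-three bump becomes n//3).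
import Mathlib
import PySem

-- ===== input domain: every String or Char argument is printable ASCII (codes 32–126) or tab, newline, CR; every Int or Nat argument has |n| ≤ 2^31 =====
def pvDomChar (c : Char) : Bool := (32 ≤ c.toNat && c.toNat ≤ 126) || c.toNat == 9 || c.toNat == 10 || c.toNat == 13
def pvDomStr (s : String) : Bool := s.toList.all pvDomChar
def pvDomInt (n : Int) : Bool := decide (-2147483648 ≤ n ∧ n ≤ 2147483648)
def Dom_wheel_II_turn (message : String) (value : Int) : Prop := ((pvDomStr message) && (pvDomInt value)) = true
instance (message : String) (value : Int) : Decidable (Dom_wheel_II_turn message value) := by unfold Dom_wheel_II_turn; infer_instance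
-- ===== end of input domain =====

-- B replaces A's per-character rebuild of the 94-entry wheel dict and its running counter/value
-- accumulators with an arithmetic code-point index and a single-pass map: (value + n//3 + idx(ch) - 1) % 94 + 1.


-- ===== PORT A =====
def allChars : List Char :=
  ['a', 'b', 'c', 'd', 'e', 'f', 'g', 'h', 'i', 'j', 'k', 'l', 'm', 'n', 'o', 'p', 'q', 'r',
   's', 't', 'u', 'v', 'w', 'x', 'y', 'z', 'A', 'B', 'C', 'D', 'E', 'F', 'G', 'H', 'I', 'J',
   'K', 'L', 'M', 'N', 'O', 'P', 'Q', 'R', 'S', 'T', 'U', 'V', 'W', 'X', 'Y', 'Z', '0', '1',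
   '2', '3', '4', '5', '6', '7', '8', '9', '|', ',', '<', '.', '>', '/', '?', '#', '~', '@',
   '\'', ';', ':', '=', '+', '-', '_', ')', '(', '*', '&', '^', '%', '$', '£', '"', '!', '[',
   ']', '{', '}', ' ']

-- the 'for char in all_chars:' loop of wheel: state = (chars dict, value)
def wheelLoop : List Char → PySem.Dict Char Int → Int → PySem.Dict Char Int
  | [], d, _ => d
  | c :: rest, d, v =>
      wheelLoop rest (d.insert c (if PySem.Int.mod v 94 = 0 then 94 else PySem.Int.mod v 94)) (v + 1)

-- chars[letter]: Python raises KeyError when letter is not a key — excluded by Pre_ (the getD 0 is unreachable there)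
def wheel (letter : Char) (value : Int) : Int :=
  ((wheelLoop allChars PySem.Dict.empty value).get? letter).getD 0

def wheel_II_turn (message : String) (value : Int) : List Int :=
  (message.toList.foldl
    (fun s character =>
      let x := wheel character s.2.2
      let group := s.1 ++ [x]
      let counter := s.2.1 + 1
      let value' := if PySem.Int.mod counter 3 = 0 then s.2.2 + 1 else s.2.2
      (group, counter, value'))
    (([] : List Int), (0 : Int), value)).1

-- ===== PORT B =====
-- _PUNCT, the wheel's tail of punctuation characters (positions 62..93)
def punctChars : List Char :=
  ['|', ',', '<', '.', '>', '/', '?', '#', '~', '@', '\'', ';', ':', '=', '+', '-', '_', ')',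
   '(', '*', '&', '^', '%', '$', '£', '"', '!', '[', ']', '{', '}', ' ']

-- _wheel_index: arithmetic on the code point; _PUNCT.index raises ValueError off the wheel —
-- excluded by Pre_, the getD 0 is unreachable there
def wheelIndex (c : Char) : Int :=
  let o : Int := c.toNat
  if 97 ≤ o ∧ o ≤ 122 then o - 97
  else if 65 ≤ o ∧ o ≤ 90 then o - 39
  else if 48 ≤ o ∧ o ≤ 57 then o + 4
  else 62 + (((PySem.List.index? punctChars c).getD 0 : Nat) : Int)

-- [(value + n // 3 + _wheel_index(ch) - 1) % 94 + 1 for n, ch in enumerate(message)]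
def wheel_II_turn_alt (message : String) (value : Int) : List Int :=
  (PySem.List.enumerate message.toList).map (fun p =>
    PySem.Int.mod (value + PySem.Int.floordiv p.1 3 + wheelIndex p.2 - 1) 94 + 1)

-- ===== PRECONDITION & SPEC =====
-- Pre_: both programs raise (KeyError / ValueError) exactly when a message character is not on the
-- wheel (all_chars = printable ASCII 32..126 without '\\' (92) and '`' (96), plus '£' (163))
def Pre_wheel_II_turn (message : String) (value : Int) : Prop :=
  (message.toList.all (fun c =>
    ((32 ≤ c.toNat && c.toNat ≤ 126) && !(c.toNat == 92) && !(c.toNat == 96)) || c.toNat == 163)) = true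
instance (message : String) (value : Int) : Decidable (Pre_wheel_II_turn message value) := by
  unfold Pre_wheel_II_turn; infer_instance
def pvWitness_wheel_II_turn : String × Int := ("Hello, world!", 7)

def Spec_wheel_II_turn (message : String) (value : Int) (out : List Int) : Prop := out = wheel_II_turn_alt message value
instance (message : String) (value : Int) (out : List Int) : Decidable (Spec_wheel_II_turn message value out) := by unfold Spec_wheel_II_turn; infer_instance

-- ===== CLAIM (what is proved, stated in full; the proofs are below) =====
def Claim_equal_wheel_II_turn : Prop := ∀ (message : String) (value : Int), Dom_wheel_II_turn message value → Pre_wheel_II_turn message value → Spec_wheel_II_turn message value (wheel_II_turn message value)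

-- ===== LEMMAS AND PROOFS =====

lemma allChars_nodup : allChars.Nodup := by decide

-- Pre_'s arithmetic condition puts the character on the wheel
lemma mem_allChars_of_code (c : Char)
    (hb : (((32 ≤ c.toNat && c.toNat ≤ 126) && !(c.toNat == 92) && !(c.toNat == 96)) || c.toNat == 163) = true) :
    c ∈ allChars := by
  have h : (32 ≤ c.toNat ∧ c.toNat ≤ 126 ∧ c.toNat ≠ 92 ∧ c.toNat ≠ 96) ∨ c.toNat = 163 := by
    simp only [Bool.or_eq_true, Bool.and_eq_true, Bool.not_eq_true', beq_eq_false_iff_ne,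
      decide_eq_true_eq, beq_iff_eq, ne_eq] at hb
    tauto
  have hmem : c.toNat ∈ allChars.map Char.toNat := by
    have hcodes : allChars.map Char.toNat =
      [97, 98, 99, 100, 101, 102, 103, 104, 105, 106, 107, 108, 109, 110, 111, 112, 113, 114,
       115, 116, 117, 118, 119, 120, 121, 122, 65, 66, 67, 68, 69, 70, 71, 72, 73, 74, 75, 76,
       77, 78, 79, 80, 81, 82, 83, 84, 85, 86, 87, 88, 89, 90, 48, 49, 50, 51, 52, 53, 54, 55,
       56, 57, 124, 44, 60, 46, 62, 47, 63, 35, 126, 64, 39, 59, 58, 61, 43, 45, 95, 41, 40,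
       42, 38, 94, 37, 36, 163, 34, 33, 91, 93, 123, 125, 32] := by decide
    rw [hcodes]
    simp only [List.mem_cons, List.not_mem_nil, or_false]
    omega
  obtain ⟨x, hx, hxc⟩ := List.mem_map.mp hmem
  have : x = c := Char.ext (UInt32.toNat_inj.mp hxc)
  exact this ▸ hx

-- B's arithmetic index agrees with the character's position on A's wheel
lemma wheelIndex_eq_idxOf (c : Char) (hc : c ∈ allChars) :
    wheelIndex c = ((allChars.idxOf c : Nat) : Int) := by
  have : allChars.all (fun c => wheelIndex c == ((allChars.idxOf c : Nat) : Int)) = true := by decide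
  rw [List.all_eq_true] at this
  exact beq_iff_eq.mp (this c hc)

lemma wheelLoop_get_not_mem (l : List Char) (d : PySem.Dict Char Int) (v : Int) (c : Char)
    (hc : c ∉ l) : (wheelLoop l d v).get? c = d.get? c := by
  induction l generalizing d v with
  | nil => rfl
  | cons h t ih =>
      simp only [List.mem_cons, not_or] at hc
      rw [wheelLoop, ih _ _ hc.2, PySem.Dict.get?_insert_of_ne _ _ hc.1]

-- A's wheel dict, looked up at a key it holds: the stored value comes from the key's position
lemma wheelLoop_get_mem (l : List Char) (d : PySem.Dict Char Int) (v : Int) (c : Char)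
    (hnd : l.Nodup) (hc : c ∈ l) :
    (wheelLoop l d v).get? c =
      some (if PySem.Int.mod (v + l.idxOf c) 94 = 0 then 94 else PySem.Int.mod (v + l.idxOf c) 94) := by
  induction l generalizing d v with
  | nil => cases hc
  | cons h t ih =>
      rw [wheelLoop]
      rcases List.mem_cons.mp hc with rfl | hmem
      · rw [wheelLoop_get_not_mem _ _ _ _ (List.nodup_cons.mp hnd).1,
          PySem.Dict.get?_insert_self]
        simp
      · have hne : c ≠ h := fun h' => (List.nodup_cons.mp hnd).1 (h' ▸ hmem)
        rw [ih _ _ (List.nodup_cons.mp hnd).2 hmem]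
        have hidx : (List.idxOf c (h :: t) : Int) = (List.idxOf c t : Int) + 1 := by
          have : List.idxOf c (h :: t) = List.idxOf c t + 1 := by
            simp [List.idxOf_cons, beq_eq_false_iff_ne.mpr (Ne.symm hne)]
          rw [this]; push_cast; ring
        rw [hidx]
        ring_nf

-- the landed wheel value: (94 if w % 94 == 0 else w % 94) = (w - 1) % 94 + 1
lemma wheel_value_eq (w : Int) :
    (if PySem.Int.mod w 94 = 0 then (94 : Int) else PySem.Int.mod w 94) =
      PySem.Int.mod (w - 1) 94 + 1 := by
  simp only [PySem.Int.mod_eq_emod_of_pos (show (0:Int) < 94 by norm_num)]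
  split_ifs <;> omega

-- A's wheel equals B's per-character formula (for characters on the wheel)
lemma wheel_eq (c : Char) (v : Int) (hc : c ∈ allChars) :
    wheel c v = PySem.Int.mod (v + wheelIndex c - 1) 94 + 1 := by
  rw [wheel, wheelLoop_get_mem _ _ _ _ allChars_nodup hc, wheelIndex_eq_idxOf c hc,
    Option.getD_some, wheel_value_eq]

-- A's running counter/value: the character labelled n by enumerate is encoded with value v + (n/3 - cnt/3)
lemma turn_loop_eq (l : List Char) (g : List Int) (cnt v : Int) (hcnt : 0 ≤ cnt) :
    (l.foldl
      (fun s character =>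
        let x := wheel character s.2.2
        let group := s.1 ++ [x]
        let counter := s.2.1 + 1
        let value' := if PySem.Int.mod counter 3 = 0 then s.2.2 + 1 else s.2.2
        (group, counter, value'))
      (g, cnt, v)).1 =
      g ++ (PySem.List.enumerate l cnt).map (fun p => wheel p.2 (v + (p.1 / 3 - cnt / 3))) := by
  induction l generalizing g cnt v with
  | nil => simp [PySem.List.enumerate_nil]
  | cons h t ih =>
      rw [List.foldl_cons, PySem.List.enumerate_cons]
      have hmod : PySem.Int.mod (cnt + 1) 3 = (cnt + 1) % 3 :=
        PySem.Int.mod_eq_emod_of_pos (by norm_num)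
      have hbump : (if PySem.Int.mod (cnt + 1) 3 = 0 then v + 1 else v) =
          v + ((cnt + 1) / 3 - cnt / 3) := by
        rw [hmod]; split_ifs <;> omega
      simp only []
      rw [ih _ _ _ (by omega), hbump]
      rw [List.map_cons, List.append_assoc, List.singleton_append]
      have hmap :
          List.map (fun p => wheel p.2 (v + ((cnt + 1) / 3 - cnt / 3) + (p.1 / 3 - (cnt + 1) / 3)))
            (PySem.List.enumerate t (cnt + 1)) =
          List.map (fun p => wheel p.2 (v + (p.1 / 3 - cnt / 3))) (PySem.List.enumerate t (cnt + 1)) :=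
        List.map_congr_left (fun p _ => congrArg (wheel p.2) (by omega))
      rw [hmap]
      simp only [sub_self, add_zero]

theorem wheel_II_turn_spec : Claim_equal_wheel_II_turn := by
  intro message value _hdom hpre
  unfold Spec_wheel_II_turn wheel_II_turn wheel_II_turn_alt
  rw [turn_loop_eq _ _ _ _ (le_refl 0), List.nil_append]
  apply List.map_congr_left
  intro p hp
  have hmem : p.2 ∈ message.toList := by
    rw [← PySem.List.map_snd_enumerate message.toList 0]
    exact List.mem_map_of_mem hp
  rw [Pre_wheel_II_turn, List.all_eq_true] at hpre
  rw [wheel_eq _ _ (mem_allChars_of_code _ (hpre _ hmem))]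
  congr 2
  rw [PySem.Int.floordiv_eq_ediv_of_pos (show (0:Int) < 3 by norm_num)]
  omega
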